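/- GENERATED by mk_final_copies.py from the proof of the farm's unit `init_blocksize` (farm:init_blocksize.2: Proof.lean) as the
   re-elaboration sweep compiled it — do not edit. -/
import Asan.CheckWalk
import Vorbis.Spec.Units.init_blocksize
import Vorbis.Spec.Worked.init_blocksize_Lemmas

/-!
  THE UNIT `init_blocksize` (0x10c1a0 … 0x10c371, stb_vorbis_fixed.c 1314–1328): the function satisfies its contract.

  The function is proved SEGMENT BY SEGMENT, one lemma per call return (the cut points `L.init_blocksize.cut1 … cut11`, plus two
  cuts inside line 1319: `atTw` 0x10c2ad, `atOom` 0x10c338). work/Lemmas.lean holds the ghost bookkeeping (`Carry`: the arena and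
  live list of NOW against those of the entry), the cut-point assertions (`InBody` + `AtCut1 … AtCut9`, `AtErr`) and the segments
  `seg1 seg2 seg3 seg5 seg7 seg8b seg9 seg10 seg11`; this file adds the helpers `InBody.step` …, the segments `seg4a seg4b seg4c seg6
  seg8`, and the composition by `ReachVia.trans` (`whole`).

      entry ─seg1→ cut1 ─seg2→ cut2 ─seg3→ cut3 ─seg4a→ atTw ─seg4b→ cut4 ─seg5→ cut5 ─seg6→ cut6 ─seg7→ cut7 ─seg8→ cut8 ─seg8b→ cut9 ─seg9→ ret
                                               └──→ atOom ─seg4c→ cut9      └──→ cut10 ─seg10→ cut9     └──→ cut11 ─seg11→ cut9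
-/

namespace Vorbis.Spec.init_blocksize
open X86 X86.User Asan Vorbis Vorbis.Spec

/-! ### Helpers of the remaining segments (S4, S6, S8): one step of `InBody`, a pointer field read back, `f->error`, `log2_4` -/

/-- The cut inside segment 4: all three twiddle tables are non-NULL (0x10c2ad, `mov rcx, r15`; line 1320). -/
abbrev atTw : Word := 0x10c2ad

/-- The first out-of-memory block (0x10c338, `mov esi, 3`; line 1319). -/
abbrev atOom : Word := 0x10c338

/-- **One step of the shared assertion**: the new state `w` has the body's registers, the frame's slots read as in `v` (two
`EqOn` facts: the save slots with `n4`, `n8`; the slot of `4·n2`), the stretch `v … w` wrote only inside the contract's footprint,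
and the two layers are given for `w` (`Carry`, possibly for a later arena). -/
theorem InBody.step {u₀ : State} {others : List Obj} {frames : List (Nat × FrameLayout)} {A : Arena} {k : Nat} {e : State}
    {ret : Word} {A' A'' : Arena} {others' others'' : List Obj} {v w : State}
    (h : InBody u₀ others frames A k e ret A' others' v)
    (hcode : CodeOK u₀ w.mem) (hinv : (conv u₀).inv w)
    (hrsp : w.reg .rsp = e.reg .rsp - 88) (hrbx : w.reg .rbx = e.reg .rdi)
    (hrbp : w.reg .rbp = Word.ofBV (Word.part .w32 (e.reg .rdx)))
    (hr12 : w.reg .r12 = Word.ofBV (Word.part .w32 (e.reg .rsi)))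
    (hfr : Mem.EqOn ((e.reg .rsp).toNat - 64) ((e.reg .rsp).toNat + 8) v.mem w.mem)
    (hfn : Mem.EqOn ((e.reg .rsp).toNat - 84) ((e.reg .rsp).toNat - 80) v.mem w.mem)
    (hsame : Mem.SameExcept ((init_blocksize.spec others frames A k).footprint e) v.mem w.mem)
    (hmid : Carry others frames A ((e.reg .rsp).toNat - 88) (e.reg .rdi).toNat A'' others'' w.mem) :
    InBody u₀ others frames A k e ret A'' others'' w := by
  obtain ⟨hap, _⟩ := h.pre
  obtain ⟨k1, k2, k3⟩ := hap.shadow.rsp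
  refine ⟨h.entry, h.pre, hcode, hinv, hrsp, hrbx, hrbp, hr12, ?_, ?_, ?_, ?_, ?_, ?_, ?_, ?_, ?_, ?_, h.same.trans hsame, hmid⟩
  · exact slot64_of_eqOn hfr h.s_ret (by u_omega) (by u_omega) (by u_omega)
  · exact slot64_of_eqOn hfr h.s_r15 (by u_omega) (by u_omega) (by u_omega)
  · exact slot64_of_eqOn hfr h.s_r14 (by u_omega) (by u_omega) (by u_omega)
  · exact slot64_of_eqOn hfr h.s_r13 (by u_omega) (by u_omega) (by u_omega)
  · exact slot64_of_eqOn hfr h.s_r12 (by u_omega) (by u_omega) (by u_omega)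
  · exact slot64_of_eqOn hfr h.s_rbp (by u_omega) (by u_omega) (by u_omega)
  · exact slot64_of_eqOn hfr h.s_rbx (by u_omega) (by u_omega) (by u_omega)
  · exact slot_of_eqOn hfn h.s_n2 (by u_omega) (by u_omega) (by u_omega)
  · exact slot_of_eqOn hfr h.s_n4 (by u_omega) (by u_omega) (by u_omega)
  · exact slot_of_eqOn hfr h.s_n8 (by u_omega) (by u_omega) (by u_omega)

/-- A pointer field of `*f`, read back from the slot the walker knows (`a` is the machine's address word of the field `n`). -/
theorem ptr_of_slot {m : Mem} {a p : Word} {n : Nat} (ha : a.toNat = n) (h : UInt64.ofNat (m.readLE a 8) = p) :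
    m.ptr n = p.toNat := by
  have e : a = addr n := eq_addr _ _ ha
  have hl := Mem.readLE_lt' m a 8
  have e8 : (256 : Nat) ^ 8 = 2 ^ 64 := by decide
  rw [e8] at hl
  unfold Mem.ptr Mem.u64
  rw [← e, ← h, UInt64.toNat_ofNat']
  omega

/-- `f->error`, from the post of `error` (`a` is the machine's address word `f + 140`). -/
theorem err_field {m : Mem} {a : Word} {f : Nat} (ha : a.toNat = f + 140) (h : m.readLE a 4 = 3) :
    stb_vorbis.error m f = 3 := by
  have e : a = addr (f + 140) := eq_addr _ _ ha
  simp only [vacc, voff]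
  unfold Mem.u32
  rw [← e]
  exact h

/-- **SH7 for `log2_4` holds in every memory that differs from the entry's by the contract's footprint only**: the stack, `*f`,
the arena and the shadow all miss the sixteen bytes of the global. -/
theorem log2_of_same {others : List Obj} {frames : List (Nat × FrameLayout)} {A : Arena} {k : Nat} {e : State} {m : Mem}
    (hpre : (init_blocksize.spec others frames A k).pre e)
    (hs : Mem.SameExcept ((init_blocksize.spec others frames A k).footprint e) e.mem m) : Log2_4In m := by
  obtain ⟨hap, hlive, hb, _, hlogobj, hlogin⟩ := hpre
  obtain ⟨k1, k2, k3⟩ := hap.shadow.rsp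
  simp only [Vorbis.Off.sizeof.stb_vorbis] at hlive
  have hflog := obj_off_log2 hlive hlogobj hap.shadow.inv
  have halog := arena_off_log2 hap.arena hlogobj
  have hbounds := hap.arena.bounds
  rw [arg32_def] at hb
  simp only [X86.User.Spec.footprint, vspec] at hs
  generalize (e.reg .rsi).toNat % 2 ^ 32 = b at hb hs
  refine log2_frame hlogin (hs.eqOn _ _ ?_)
  intro w hw
  simp only [List.mem_cons, List.not_mem_nil, or_false] at hw
  rcases hw with rfl | rfl | rfl | rfl | rfl | rfl | rfl | rfl | rfl | rfl | rfl
  all_goals first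
    | (simp only; omega)
    | (unfold shadowSpan; simp only; omega)

/-- **At 0x10c338 (`atOom`: `mov esi, 3 ; mov rdi, rbx ; call error` of line 1319)**: one of `A[b]`, `B[b]`, `C[b]` is NULL. -/
structure AtOom (u₀ : State) (others : List Obj) (frames : List (Nat × FrameLayout)) (A : Arena) (k : Nat) (e : State)
    (ret : Word) (A' : Arena) (others' : List Obj) (v : State) : Prop where
  /-- the shared part -/
  body : InBody u₀ others frames A k e ret A' others' v
  /-- the cut point -/
  rip : v.rip = atOom

/-- **At 0x10c2ad (`atTw`: the three NULL tests of line 1319 passed)**: r13 = `A[b]`, rdx = `B[b]`, r15 = `C[b]`, the three blocks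
allocated by this call, inside the free gap of the entry's arena. -/
structure AtTw (u₀ : State) (others : List Obj) (frames : List (Nat × FrameLayout)) (A : Arena) (k : Nat) (e : State)
    (ret : Word) (A' : Arena) (others' : List Obj) (v : State) : Prop where
  /-- the shared part -/
  body : InBody u₀ others frames A k e ret A' others' v
  /-- the cut point -/
  rip : v.rip = atTw
  /-- `A[b]`, `B[b]`, `C[b]` -/
  tabs : Tab3 A A' v.mem (e.reg .rdi).toNat ((e.reg .rsi).toNat % 2 ^ 32) ((e.reg .rdx).toNat % 2 ^ 32)
  /-- r13 = `A[b]` -/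
  r13 : (v.reg .r13).toNat = stb_vorbis.A v.mem (e.reg .rdi).toNat ((e.reg .rsi).toNat % 2 ^ 32)
  /-- rdx = `B[b]` -/
  rdx : (v.reg .rdx).toNat = stb_vorbis.B v.mem (e.reg .rdi).toNat ((e.reg .rsi).toNat % 2 ^ 32)
  /-- r15 = `C[b]` -/
  r15 : (v.reg .r15).toNat = stb_vorbis.C v.mem (e.reg .rdi).toNat ((e.reg .rsi).toNat % 2 ^ 32)
  /-- `A[b]` lies in the free gap -/
  inA : A.B + A.S + 32 ≤ (v.reg .r13).toNat ∧ (v.reg .r13).toNat + 2 * ((e.reg .rdx).toNat % 2 ^ 32) ≤ A.B + A.T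
  /-- `B[b]` lies in the free gap -/
  inB : A.B + A.S + 32 ≤ (v.reg .rdx).toNat ∧ (v.reg .rdx).toNat + 2 * ((e.reg .rdx).toNat % 2 ^ 32) ≤ A.B + A.T
  /-- `C[b]` lies in the free gap -/
  inC : A.B + A.S + 32 ≤ (v.reg .r15).toNat ∧ (v.reg .r15).toNat + (e.reg .rdx).toNat % 2 ^ 32 ≤ A.B + A.T

/-! ### Segment 4: line 1319–1320 -/

set_option maxRecDepth 8000 in
set_option maxHeartbeats 64000000 in
/-- **Segment 4a** (`cut3` 0x10c241 … `atTw` 0x10c2ad or `atOom` 0x10c338; lines 1318–1319): the checked store `f->C[b] = rax`,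
the two checked re-loads of `f->A[b]`, `f->B[b]`, the three NULL tests. From `AtCut3` to `AtTw` (three tables) or `AtOom`. -/
theorem seg4a {Lay : Layout} (hLay : Lay.hi = 0x1000000) {μ : Microarch} (hμ : UserX.MicroOK μ) {u₀ : State}
    (hcode : HasCodeNat Lay u₀ Vorbis.L.init_blocksize.entry Vorbis.Code.code_init_blocksize.nat Vorbis.L.init_blocksize.size)
    (hstore8 : Asan.SmallCheck Lay μ Vorbis.WayInv (Vorbis.CodeOK u₀) [.rax, .rcx, .rdx] 8 Vorbis.L.__asan_store8_noabort.entry)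
    (hload8 : Asan.SmallCheck Lay μ Vorbis.WayInv (Vorbis.CodeOK u₀) [.rax, .rcx, .rdx] 8 Vorbis.L.__asan_load8_noabort.entry)
    (others : List Obj) (frames : List (Nat × FrameLayout)) (A : Arena) (k : Nat) (u : State) (ret : Word)
    (A3 : Arena) (others3 : List Obj) (v : State) (hat : AtCut3 u₀ others frames A k u ret A3 others3 v) :
    ReachVia Lay μ Vorbis.WayInv v (fun w => AtTw u₀ others frames A k u ret A3 others3 w ∨
      AtOom u₀ others frames A k u ret A3 others3 w) := by
  obtain ⟨hbody, hrip, hr13, hr14, hspa, hptrA, hptrB, hresC⟩ := hat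
  have he := hbody.entry
  have hpre := hbody.pre
  have he0 := he
  have hpre0 := hpre
  v_entry he
  obtain ⟨hap, hlive, hb, hld, hlogobj, hlogin⟩ := hpre
  have hlive0 := hlive
  have hsh := hap.shadow
  have hsp := hsh.rsp
  rw [arg32_def] at hb hld
  -- the two `int` arguments, named
  generalize hbq : (u.reg .rsi).toNat % 2 ^ 32 = b at hb
  generalize hnq : (u.reg .rdx).toNat % 2 ^ 32 = n at hld
  -- where `*f` is; where the free gap of the arena is
  have hwhere := hlive.where_ hsh.inv hsh.offText (by decide)
  simp only [Vorbis.Off.sizeof.stb_vorbis] at hwhere hlive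
  have hgap := obj_off_gap hlive hap.arena hsh.inv
  have hbounds := hap.arena.bounds
  have h1x := hap.arena.AR1x
  have htext : 0x119d40 ≤ A.B := hap.offText
  have hsx : (Word.ofBV (BitVec.signExtend 64 (Word.part .w32 (u.reg .rsi)))).toNat = b := by
    rw [← hbq, ← arg32_def]
    exact arg32_sext u .rsi (by rw [arg32_def]; omega)
  have hnv : (Word.part .w32 (u.reg .rdx)).toNat = n := by
    rw [← hnq]
    exact Asan.part32_toNat _
  have hfacts := hld.isBlocksize.facts
  have hshlo : (shadowSpan (A.B + A.S) (A.B + A.T)).lo = 0xC00000 + (A.B + A.S) / 8 := rfl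
  have hshhi : (shadowSpan (A.B + A.S) (A.B + A.T)).hi = 0xC00000 + (A.B + A.T + 7) / 8 := rfl
  -- the contract's footprint, named, and its windows
  obtain ⟨FP, hFP⟩ : ∃ FP : List Span, FP =
      [⟨(u.reg .rsp).toNat - 256, (u.reg .rsp).toNat⟩, ⟨(u.reg .rdi).toNat + 8, (u.reg .rdi).toNat + 12⟩, ⟨(u.reg .rdi).toNat + 128, (u.reg .rdi).toNat + 132⟩, ⟨(u.reg .rdi).toNat + 140, (u.reg .rdi).toNat + 144⟩, ⟨(u.reg .rdi).toNat + 1400 + 8 * b, (u.reg .rdi).toNat + 1408 + 8 * b⟩, ⟨(u.reg .rdi).toNat + 1416 + 8 * b, (u.reg .rdi).toNat + 1424 + 8 * b⟩, ⟨(u.reg .rdi).toNat + 1432 + 8 * b, (u.reg .rdi).toNat + 1440 + 8 * b⟩, ⟨(u.reg .rdi).toNat + 1448 + 8 * b, (u.reg .rdi).toNat + 1456 + 8 * b⟩, ⟨(u.reg .rdi).toNat + 1464 + 8 * b, (u.reg .rdi).toNat + 1472 + 8 * b⟩,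
       ⟨A.B + A.S, A.B + A.T⟩, shadowSpan (A.B + A.S) (A.B + A.T)] := ⟨_, rfl⟩
  have m_st : (⟨(u.reg .rsp).toNat - 256, (u.reg .rsp).toNat⟩ : Span) ∈ FP := by rw [hFP]; simp only [List.mem_cons, true_or]
  have m_f140 : (⟨(u.reg .rdi).toNat + 140, (u.reg .rdi).toNat + 144⟩ : Span) ∈ FP := by rw [hFP]; simp only [List.mem_cons, true_or, or_true]
  have m_A : (⟨(u.reg .rdi).toNat + 1400 + 8 * b, (u.reg .rdi).toNat + 1408 + 8 * b⟩ : Span) ∈ FP := by rw [hFP]; simp only [List.mem_cons, true_or, or_true]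
  have m_B : (⟨(u.reg .rdi).toNat + 1416 + 8 * b, (u.reg .rdi).toNat + 1424 + 8 * b⟩ : Span) ∈ FP := by rw [hFP]; simp only [List.mem_cons, true_or, or_true]
  have m_C : (⟨(u.reg .rdi).toNat + 1432 + 8 * b, (u.reg .rdi).toNat + 1440 + 8 * b⟩ : Span) ∈ FP := by rw [hFP]; simp only [List.mem_cons, true_or, or_true]
  have m_W : (⟨(u.reg .rdi).toNat + 1448 + 8 * b, (u.reg .rdi).toNat + 1456 + 8 * b⟩ : Span) ∈ FP := by rw [hFP]; simp only [List.mem_cons, true_or, or_true]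
  have m_R : (⟨(u.reg .rdi).toNat + 1464 + 8 * b, (u.reg .rdi).toNat + 1472 + 8 * b⟩ : Span) ∈ FP := by rw [hFP]; simp only [List.mem_cons, true_or, or_true]
  have m_gap : (⟨A.B + A.S, A.B + A.T⟩ : Span) ∈ FP := by rw [hFP]; simp only [List.mem_cons, true_or, or_true]
  -- the present state: the walker reads these by type
  have hMv := hbody.mid
  have c_rsp := hbody.rsp
  have c_rbx := hbody.rbx
  have c_rbp := hbody.rbp
  have c_r12 := hbody.r12
  have w_eq : Mem.EqOn Vorbis.L.textLo Vorbis.L.textHi u₀.mem v.mem := hbody.code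
  have hdf : v.flags .df = false := (show abiInv _ from hbody.inv).1
  have hmx : v.mxcsr &&& 0x1F80 = 0x1F80 := (show abiInv _ from hbody.inv).2
  have hsse := Vorbis.sseOK_of_abiInv hbody.inv
  have c_rip : v.rip = Vorbis.L.init_blocksize.cut3 := hrip
  have c_r13 := hr13
  have c_r14 := hr14
  have k_pa := hspa
  rw [hnq] at hptrA hptrB hresC
  obtain ⟨pA, kA⟩ : ∃ z, UInt64.ofNat (v.mem.readLE
      (u.reg .rdi + (Word.ofBV (BitVec.signExtend 64 (Word.part .w32 (u.reg .rsi))) + 174) * 8 + 8) 8) = z := ⟨_, rfl⟩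
  rw [kA] at hptrA
  obtain ⟨pB, kB⟩ : ∃ z, UInt64.ofNat (v.mem.readLE
      (u.reg .rdi + (Word.ofBV (BitVec.signExtend 64 (Word.part .w32 (u.reg .rsi))) + 176) * 8 + 8) 8) = z := ⟨_, rfl⟩
  rw [kB] at hptrB
  obtain ⟨pC, c_rax⟩ : ∃ z, v.reg .rax = z := ⟨_, rfl⟩
  rw [c_rax] at hresC
  u_walk hcode [hμ.vendor] until [atTw, atOom] span [Vorbis.L.textLo, Vorbis.L.textHi] side (v_side)
  case check_10c258 =>
    -- a field of `*f`: inside the live object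
    have hun : ShadowUntouched v.mem s_10c258.mem := by v_untouched
    exact (hMv.liveIn hlive).accSmall hMv.shadow hun _ 8 (by decide) (by u_omega) (by u_omega)
  case check_10c26c =>
    -- a field of `*f`: inside the live object
    have hun : ShadowUntouched v.mem s_10c26c.mem := by v_untouched
    exact (hMv.liveIn hlive).accSmall hMv.shadow hun _ 8 (by decide) (by u_omega) (by u_omega)
  case check_10c291 =>
    -- a field of `*f`: inside the live object
    have hun : ShadowUntouched v.mem s_10c291.mem := by v_untouched
    exact (hMv.liveIn hlive).accSmall hMv.shadow hun _ 8 (by decide) (by u_omega) (by u_omega)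
  · -- ── `A[b]` is NULL: to the out-of-memory block ──
    have hfr : Mem.EqOn ((u.reg .rsp).toNat - 64) ((u.reg .rsp).toNat + 8) v.mem s_10c279.mem := by
      u_memnorm
      u_eqon
    have hfn : Mem.EqOn ((u.reg .rsp).toNat - 84) ((u.reg .rsp).toNat - 80) v.mem s_10c279.mem := by
      u_memnorm
      u_eqon
    have hf112 : Mem.EqOn ((u.reg .rdi).toNat + 112) ((u.reg .rdi).toNat + 136) v.mem s_10c279.mem := by
      u_memnorm
      u_eqon
    have hseg : Mem.SameExcept
        [⟨(u.reg .rsp).toNat - 256, (u.reg .rsp).toNat⟩,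
         ⟨(u.reg .rdi).toNat + 1432 + 8 * b, (u.reg .rdi).toNat + 1440 + 8 * b⟩] v.mem s_10c279.mem := by
      u_same
    have hunV : ShadowUntouched v.mem s_10c279.mem := by v_untouched
    have hsameN : Mem.SameExcept ((init_blocksize.spec others frames A k).footprint u) v.mem s_10c279.mem := by
      simp only [X86.User.Spec.footprint, vspec, hbq]
      rw [← hFP]
      refine widenWins hseg ?_
      intro w hw
      simp only [List.mem_cons, List.not_mem_nil, or_false] at hw
      rcases hw with rfl | rfl
      · exact Or.inr ⟨_, m_st, Nat.le_refl _, Nat.le_refl _⟩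
      · exact Or.inr ⟨_, m_C, Nat.le_refl _, Nat.le_refl _⟩
    have hinv : (Vorbis.conv u₀).inv s_10c279 := by v_inv
    have hB' := hbody.step w_eq hinv w_rsp ((w_kept .rbx rfl).trans c_rbx) ((w_kept .rbp rfl).trans c_rbp)
      ((w_kept .r12 rfl).trans c_r12) hfr hfn hsameN (hMv.frame (by omega) hf112 hunV)
    exact ReachVia.done (Or.inr ⟨hB', w_rip⟩)
  · -- ── `B[b]` is NULL: to the out-of-memory block ──
    have hfr : Mem.EqOn ((u.reg .rsp).toNat - 64) ((u.reg .rsp).toNat + 8) v.mem s_10c29e.mem := by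
      u_memnorm
      u_eqon
    have hfn : Mem.EqOn ((u.reg .rsp).toNat - 84) ((u.reg .rsp).toNat - 80) v.mem s_10c29e.mem := by
      u_memnorm
      u_eqon
    have hf112 : Mem.EqOn ((u.reg .rdi).toNat + 112) ((u.reg .rdi).toNat + 136) v.mem s_10c29e.mem := by
      u_memnorm
      u_eqon
    have hseg : Mem.SameExcept
        [⟨(u.reg .rsp).toNat - 256, (u.reg .rsp).toNat⟩,
         ⟨(u.reg .rdi).toNat + 1432 + 8 * b, (u.reg .rdi).toNat + 1440 + 8 * b⟩] v.mem s_10c29e.mem := by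
      u_same
    have hunV : ShadowUntouched v.mem s_10c29e.mem := by v_untouched
    have hsameN : Mem.SameExcept ((init_blocksize.spec others frames A k).footprint u) v.mem s_10c29e.mem := by
      simp only [X86.User.Spec.footprint, vspec, hbq]
      rw [← hFP]
      refine widenWins hseg ?_
      intro w hw
      simp only [List.mem_cons, List.not_mem_nil, or_false] at hw
      rcases hw with rfl | rfl
      · exact Or.inr ⟨_, m_st, Nat.le_refl _, Nat.le_refl _⟩
      · exact Or.inr ⟨_, m_C, Nat.le_refl _, Nat.le_refl _⟩
    have hinv : (Vorbis.conv u₀).inv s_10c29e := by v_inv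
    have hB' := hbody.step w_eq hinv w_rsp ((w_kept .rbx rfl).trans c_rbx) ((w_kept .rbp rfl).trans c_rbp)
      ((w_kept .r12 rfl).trans c_r12) hfr hfn hsameN (hMv.frame (by omega) hf112 hunV)
    exact ReachVia.done (Or.inr ⟨hB', w_rip⟩)
  · -- ── `C[b]` is NULL: to the out-of-memory block ──
    have hfr : Mem.EqOn ((u.reg .rsp).toNat - 64) ((u.reg .rsp).toNat + 8) v.mem s_10c2a7.mem := by
      u_memnorm
      u_eqon
    have hfn : Mem.EqOn ((u.reg .rsp).toNat - 84) ((u.reg .rsp).toNat - 80) v.mem s_10c2a7.mem := by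
      u_memnorm
      u_eqon
    have hf112 : Mem.EqOn ((u.reg .rdi).toNat + 112) ((u.reg .rdi).toNat + 136) v.mem s_10c2a7.mem := by
      u_memnorm
      u_eqon
    have hseg : Mem.SameExcept
        [⟨(u.reg .rsp).toNat - 256, (u.reg .rsp).toNat⟩,
         ⟨(u.reg .rdi).toNat + 1432 + 8 * b, (u.reg .rdi).toNat + 1440 + 8 * b⟩] v.mem s_10c2a7.mem := by
      u_same
    have hunV : ShadowUntouched v.mem s_10c2a7.mem := by v_untouched
    have hsameN : Mem.SameExcept ((init_blocksize.spec others frames A k).footprint u) v.mem s_10c2a7.mem := by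
      simp only [X86.User.Spec.footprint, vspec, hbq]
      rw [← hFP]
      refine widenWins hseg ?_
      intro w hw
      simp only [List.mem_cons, List.not_mem_nil, or_false] at hw
      rcases hw with rfl | rfl
      · exact Or.inr ⟨_, m_st, Nat.le_refl _, Nat.le_refl _⟩
      · exact Or.inr ⟨_, m_C, Nat.le_refl _, Nat.le_refl _⟩
    have hinv : (Vorbis.conv u₀).inv s_10c2a7 := by v_inv
    have hB' := hbody.step w_eq hinv w_rsp ((w_kept .rbx rfl).trans c_rbx) ((w_kept .rbp rfl).trans c_rbp)
      ((w_kept .r12 rfl).trans c_r12) hfr hfn hsameN (hMv.frame (by omega) hf112 hunV)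
    exact ReachVia.done (Or.inr ⟨hB', w_rip⟩)
  · -- ── the three tables are allocated (0x10c2ad = `atTw`) ──
    obtain ⟨hSA, hA1, hA2⟩ : Since A A3 ⟨pA.toNat, 2 * n⟩ ∧ A.B + A.S + 32 ≤ pA.toNat ∧ pA.toNat + 2 * n ≤ A.B + A.T := by
      rcases hptrA with h0 | h1
      · exact absurd (by rw [h0]; rfl) hbr_10c279
      · exact h1
    obtain ⟨hSB, hB1, hB2⟩ : Since A A3 ⟨pB.toNat, 2 * n⟩ ∧ A.B + A.S + 32 ≤ pB.toNat ∧ pB.toNat + 2 * n ≤ A.B + A.T := by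
      rcases hptrB with h0 | h1
      · exact absurd (by rw [h0]; rfl) hbr_10c29e
      · exact h1
    obtain ⟨hSC, hC1, hC2⟩ : Since A A3 ⟨pC.toNat, n⟩ ∧ A.B + A.S + 32 ≤ pC.toNat ∧ pC.toNat + n ≤ A.B + A.T := by
      rcases hresC with h0 | h1
      · exact absurd (by rw [h0]; rfl) hbr_10c2a7
      · exact h1
    have hfr : Mem.EqOn ((u.reg .rsp).toNat - 64) ((u.reg .rsp).toNat + 8) v.mem s_10c2a7.mem := by
      u_memnorm
      u_eqon
    have hfn : Mem.EqOn ((u.reg .rsp).toNat - 84) ((u.reg .rsp).toNat - 80) v.mem s_10c2a7.mem := by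
      u_memnorm
      u_eqon
    have hf112 : Mem.EqOn ((u.reg .rdi).toNat + 112) ((u.reg .rdi).toNat + 136) v.mem s_10c2a7.mem := by
      u_memnorm
      u_eqon
    have hseg : Mem.SameExcept
        [⟨(u.reg .rsp).toNat - 256, (u.reg .rsp).toNat⟩,
         ⟨(u.reg .rdi).toNat + 1432 + 8 * b, (u.reg .rdi).toNat + 1440 + 8 * b⟩] v.mem s_10c2a7.mem := by
      u_same
    have hunV : ShadowUntouched v.mem s_10c2a7.mem := by v_untouched
    have hsameN : Mem.SameExcept ((init_blocksize.spec others frames A k).footprint u) v.mem s_10c2a7.mem := by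
      simp only [X86.User.Spec.footprint, vspec, hbq]
      rw [← hFP]
      refine widenWins hseg ?_
      intro w hw
      simp only [List.mem_cons, List.not_mem_nil, or_false] at hw
      rcases hw with rfl | rfl
      · exact Or.inr ⟨_, m_st, Nat.le_refl _, Nat.le_refl _⟩
      · exact Or.inr ⟨_, m_C, Nat.le_refl _, Nat.le_refl _⟩
    have hinv : (Vorbis.conv u₀).inv s_10c2a7 := by v_inv
    have hB' := hbody.step w_eq hinv w_rsp ((w_kept .rbx rfl).trans c_rbx) ((w_kept .rbp rfl).trans c_rbp)
      ((w_kept .r12 rfl).trans c_r12) hfr hfn hsameN (hMv.frame (by omega) hf112 hunV)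
    have hA : Mem.EqOn ((u.reg .rdi).toNat + 1400 + 8 * b) ((u.reg .rdi).toNat + 1408 + 8 * b) v.mem s_10c2a7.mem := by
      u_memnorm
      u_eqon
    have hBq : Mem.EqOn ((u.reg .rdi).toNat + 1416 + 8 * b) ((u.reg .rdi).toNat + 1424 + 8 * b) v.mem s_10c2a7.mem := by
      u_memnorm
      u_eqon
    have G_C : UInt64.ofNat (s_10c2a7.mem.readLE
        (u.reg .rdi + (Word.ofBV (BitVec.signExtend 64 (Word.part .w32 (u.reg .rsi))) + 178) * 8 + 8) 8) = pC := by
      u_resolve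
    have eA : stb_vorbis.A s_10c2a7.mem (u.reg .rdi).toNat b = pA.toNat := by
      simp only [vacc, voff]
      exact ptr_of_slot (by u_omega) (slot64_of_eqOn hA kA (by u_omega) (by u_omega) (by u_omega))
    have eB : stb_vorbis.B s_10c2a7.mem (u.reg .rdi).toNat b = pB.toNat := by
      simp only [vacc, voff]
      exact ptr_of_slot (by u_omega) (slot64_of_eqOn hBq kB (by u_omega) (by u_omega) (by u_omega))
    have eC : stb_vorbis.C s_10c2a7.mem (u.reg .rdi).toNat b = pC.toNat := by
      simp only [vacc, voff]
      exact ptr_of_slot (by u_omega) G_C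
    refine ReachVia.done (Or.inl ⟨hB', w_rip, ?_, ?_, ?_, ?_, ?_, ?_, ?_⟩)
    · rw [hnq, hbq]
      refine ⟨?_, ?_, ?_⟩
      · rw [eA]
        exact hSA
      · rw [eB]
        exact hSB
      · rw [eC]
        exact hSC
    · rw [hbq, w_r13, eA]
    · rw [hbq, w_rdx, eB]
    · rw [hbq, w_r15, eC]
    · rw [hnq, w_r13]
      exact ⟨hA1, hA2⟩
    · rw [hnq, w_rdx]
      exact ⟨hB1, hB2⟩
    · rw [hnq, w_r15]
      exact ⟨hC1, hC2⟩

set_option maxRecDepth 8000 in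
set_option maxHeartbeats 64000000 in
/-- **Segment 4b** (`atTw` 0x10c2ad … `cut4` 0x10c2ba; line 1320): `compute_twiddle_factors(n, A[b], B[b], C[b])`. The three
blocks are live (allocated since the entry); the callee writes only into them, i.e. into the free gap of the entry's arena, which
`*f` does not meet: the three pointer fields read as before. From `AtTw` to `AtCut4`. -/
theorem seg4b {Lay : Layout} (hLay : Lay.hi = 0x1000000) {μ : Microarch} (hμ : UserX.MicroOK μ) {u₀ : State}
    (hcode : HasCodeNat Lay u₀ Vorbis.L.init_blocksize.entry Vorbis.Code.code_init_blocksize.nat Vorbis.L.init_blocksize.size)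
    (h_tw : ∀ (others : List Obj) (frames : List (Nat × FrameLayout)),
      Calls Lay μ Vorbis.WayInv (Vorbis.conv u₀) Vorbis.L.compute_twiddle_factors.entry (Vorbis.Spec.compute_twiddle_factors.spec others frames))
    (others : List Obj) (frames : List (Nat × FrameLayout)) (A : Arena) (k : Nat) (u : State) (ret : Word)
    (A3 : Arena) (others3 : List Obj) (v : State) (hat : AtTw u₀ others frames A k u ret A3 others3 v) :
    ReachVia Lay μ Vorbis.WayInv v (AtCut4 u₀ others frames A k u ret A3 others3) := by
  obtain ⟨hbody, hrip, htabs, hr13, hrdx, hr15, hinA, hinB, hinC⟩ := hat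
  have he := hbody.entry
  have hpre := hbody.pre
  have he0 := he
  have hpre0 := hpre
  v_entry he
  obtain ⟨hap, hlive, hb, hld, hlogobj, hlogin⟩ := hpre
  have hlive0 := hlive
  have hsh := hap.shadow
  have hsp := hsh.rsp
  rw [arg32_def] at hb hld
  -- the two `int` arguments, named
  generalize hbq : (u.reg .rsi).toNat % 2 ^ 32 = b at hb
  generalize hnq : (u.reg .rdx).toNat % 2 ^ 32 = n at hld
  -- where `*f` is; where the free gap of the arena is
  have hwhere := hlive.where_ hsh.inv hsh.offText (by decide)
  simp only [Vorbis.Off.sizeof.stb_vorbis] at hwhere hlive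
  have hgap := obj_off_gap hlive hap.arena hsh.inv
  have hbounds := hap.arena.bounds
  have h1x := hap.arena.AR1x
  have htext : 0x119d40 ≤ A.B := hap.offText
  have hsx : (Word.ofBV (BitVec.signExtend 64 (Word.part .w32 (u.reg .rsi)))).toNat = b := by
    rw [← hbq, ← arg32_def]
    exact arg32_sext u .rsi (by rw [arg32_def]; omega)
  have hnv : (Word.part .w32 (u.reg .rdx)).toNat = n := by
    rw [← hnq]
    exact Asan.part32_toNat _
  have hfacts := hld.isBlocksize.facts
  have hshlo : (shadowSpan (A.B + A.S) (A.B + A.T)).lo = 0xC00000 + (A.B + A.S) / 8 := rfl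
  have hshhi : (shadowSpan (A.B + A.S) (A.B + A.T)).hi = 0xC00000 + (A.B + A.T + 7) / 8 := rfl
  -- the contract's footprint, named, and its windows
  obtain ⟨FP, hFP⟩ : ∃ FP : List Span, FP =
      [⟨(u.reg .rsp).toNat - 256, (u.reg .rsp).toNat⟩, ⟨(u.reg .rdi).toNat + 8, (u.reg .rdi).toNat + 12⟩, ⟨(u.reg .rdi).toNat + 128, (u.reg .rdi).toNat + 132⟩, ⟨(u.reg .rdi).toNat + 140, (u.reg .rdi).toNat + 144⟩, ⟨(u.reg .rdi).toNat + 1400 + 8 * b, (u.reg .rdi).toNat + 1408 + 8 * b⟩, ⟨(u.reg .rdi).toNat + 1416 + 8 * b, (u.reg .rdi).toNat + 1424 + 8 * b⟩, ⟨(u.reg .rdi).toNat + 1432 + 8 * b, (u.reg .rdi).toNat + 1440 + 8 * b⟩, ⟨(u.reg .rdi).toNat + 1448 + 8 * b, (u.reg .rdi).toNat + 1456 + 8 * b⟩, ⟨(u.reg .rdi).toNat + 1464 + 8 * b, (u.reg .rdi).toNat + 1472 + 8 * b⟩,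
       ⟨A.B + A.S, A.B + A.T⟩, shadowSpan (A.B + A.S) (A.B + A.T)] := ⟨_, rfl⟩
  have m_st : (⟨(u.reg .rsp).toNat - 256, (u.reg .rsp).toNat⟩ : Span) ∈ FP := by rw [hFP]; simp only [List.mem_cons, true_or]
  have m_f140 : (⟨(u.reg .rdi).toNat + 140, (u.reg .rdi).toNat + 144⟩ : Span) ∈ FP := by rw [hFP]; simp only [List.mem_cons, true_or, or_true]
  have m_A : (⟨(u.reg .rdi).toNat + 1400 + 8 * b, (u.reg .rdi).toNat + 1408 + 8 * b⟩ : Span) ∈ FP := by rw [hFP]; simp only [List.mem_cons, true_or, or_true]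
  have m_B : (⟨(u.reg .rdi).toNat + 1416 + 8 * b, (u.reg .rdi).toNat + 1424 + 8 * b⟩ : Span) ∈ FP := by rw [hFP]; simp only [List.mem_cons, true_or, or_true]
  have m_C : (⟨(u.reg .rdi).toNat + 1432 + 8 * b, (u.reg .rdi).toNat + 1440 + 8 * b⟩ : Span) ∈ FP := by rw [hFP]; simp only [List.mem_cons, true_or, or_true]
  have m_W : (⟨(u.reg .rdi).toNat + 1448 + 8 * b, (u.reg .rdi).toNat + 1456 + 8 * b⟩ : Span) ∈ FP := by rw [hFP]; simp only [List.mem_cons, true_or, or_true]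
  have m_R : (⟨(u.reg .rdi).toNat + 1464 + 8 * b, (u.reg .rdi).toNat + 1472 + 8 * b⟩ : Span) ∈ FP := by rw [hFP]; simp only [List.mem_cons, true_or, or_true]
  have m_gap : (⟨A.B + A.S, A.B + A.T⟩ : Span) ∈ FP := by rw [hFP]; simp only [List.mem_cons, true_or, or_true]
  -- the present state: the walker reads these by type
  have hMv := hbody.mid
  have c_rsp := hbody.rsp
  have c_rbx := hbody.rbx
  have c_rbp := hbody.rbp
  have c_r12 := hbody.r12
  have w_eq : Mem.EqOn Vorbis.L.textLo Vorbis.L.textHi u₀.mem v.mem := hbody.code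
  have hdf : v.flags .df = false := (show abiInv _ from hbody.inv).1
  have hmx : v.mxcsr &&& 0x1F80 = 0x1F80 := (show abiInv _ from hbody.inv).2
  have hsse := Vorbis.sseOK_of_abiInv hbody.inv
  have c_rip : v.rip = atTw := hrip
  rw [hnq, hbq] at htabs
  rw [hbq] at hr13 hrdx hr15
  rw [hnq] at hinA hinB hinC
  obtain ⟨pA, c_r13⟩ : ∃ z, v.reg .r13 = z := ⟨_, rfl⟩
  obtain ⟨pB, c_rdx⟩ : ∃ z, v.reg .rdx = z := ⟨_, rfl⟩
  obtain ⟨pC, c_r15⟩ : ∃ z, v.reg .r15 = z := ⟨_, rfl⟩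
  rw [c_r13] at hr13 hinA
  rw [c_rdx] at hrdx hinB
  rw [c_r15] at hr15 hinC
  obtain ⟨hA1, hA2⟩ := hinA
  obtain ⟨hB1, hB2⟩ := hinB
  obtain ⟨hC1, hC2⟩ := hinC
  have hSA : Since A A3 ⟨pA.toNat, 2 * n⟩ := by
    rw [hr13]
    exact htabs.tA
  have hSB : Since A A3 ⟨pB.toNat, 2 * n⟩ := by
    rw [hrdx]
    exact htabs.tB
  have hSC : Since A A3 ⟨pC.toNat, n⟩ := by
    rw [hr15]
    exact htabs.tC
  have htw := h_tw others3 frames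
  -- ── `compute_twiddle_factors(n, A[b], B[b], C[b])`, line 1320 ──
  u_walk hcode [hμ.vendor] span [Vorbis.L.textLo, Vorbis.L.textHi] side (v_side)
  case call_inv => v_inv
  case pre_10c2b5 =>
    have hM : Carry others frames A ((u.reg .rsp).toNat - 88) (u.reg .rdi).toNat A3 others3 s_10c2b5.mem := by
      refine hMv.frame (by omega) ?_ ?_
      · u_memnorm
        u_eqon
      · v_untouched
    have c_arg : arg32 s_10c2b5 .rdi = n := by
      rw [arg32_def, w_rdi, Vorbis.toNat_ofBV32, hnv]
      exact Nat.mod_eq_of_lt (by omega)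
    have c_rdxS : s_10c2b5.reg .rdx = pB := (w_kept .rdx rfl).trans c_rdx
    show ShadowPre others3 frames s_10c2b5 ∧ Mdct.IsBlocksize (arg32 s_10c2b5 .rdi) ∧
      LiveBytes others3 frames (s_10c2b5.reg .rsi).toNat (2 * arg32 s_10c2b5 .rdi) ∧
      LiveBytes others3 frames (s_10c2b5.reg .rdx).toNat (2 * arg32 s_10c2b5 .rdi) ∧
      LiveBytes others3 frames (s_10c2b5.reg .rcx).toNat (arg32 s_10c2b5 .rdi)
    refine ⟨hM.shadowPre (by rw [w_rsp]; u_omega), ?_, ?_, ?_, ?_⟩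
    · rw [c_arg]
      exact hld.isBlocksize
    · rw [c_arg, w_rsi]
      exact LiveBytes.of_liveIn (hM.since_live hSA)
    · rw [c_arg, c_rdxS]
      exact LiveBytes.of_liveIn (hM.since_live hSB)
    · rw [c_arg, w_rcx]
      exact LiveBytes.of_liveIn (hM.since_live hSC)
  · -- ── the return of `compute_twiddle_factors` (0x10c2ba = `cut4`): `AtCut4` ──
    have w_eq := Vorbis.conv_code_eqOn w_code
    have c_rdxS : s_10c2b5.reg .rdx = pB := (w_kept_10c2b5 .rdx rfl).trans c_rdx
    simp only [X86.User.Spec.footprint, vspec, w_rsp_10c2b5, w_rsi_10c2b5, w_rcx_10c2b5, c_rdxS] at w_same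
    have c_n : (s_10c2b5.reg .rdi).toNat % 2 ^ 32 = n := by
      rw [w_rdi_10c2b5, Vorbis.toNat_ofBV32, hnv]
      exact Nat.mod_eq_of_lt (by omega)
    rw [c_n] at w_same
    rw [w_mem_10c2b5] at w_same
    have hfr : Mem.EqOn ((u.reg .rsp).toNat - 64) ((u.reg .rsp).toNat + 8) v.mem s_10c2b5r.mem := by
      u_eqon
    have hfn : Mem.EqOn ((u.reg .rsp).toNat - 84) ((u.reg .rsp).toNat - 80) v.mem s_10c2b5r.mem := by
      u_eqon
    have hf112 : Mem.EqOn ((u.reg .rdi).toNat + 112) ((u.reg .rdi).toNat + 136) v.mem s_10c2b5r.mem := by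
      u_eqon
    have hA : Mem.EqOn ((u.reg .rdi).toNat + 1400 + 8 * b) ((u.reg .rdi).toNat + 1408 + 8 * b) v.mem s_10c2b5r.mem := by
      u_eqon
    have hB : Mem.EqOn ((u.reg .rdi).toNat + 1416 + 8 * b) ((u.reg .rdi).toNat + 1424 + 8 * b) v.mem s_10c2b5r.mem := by
      u_eqon
    have hC : Mem.EqOn ((u.reg .rdi).toNat + 1432 + 8 * b) ((u.reg .rdi).toNat + 1440 + 8 * b) v.mem s_10c2b5r.mem := by
      u_eqon
    have hseg : Mem.SameExcept
        [⟨(u.reg .rsp).toNat - 256, (u.reg .rsp).toNat⟩,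
         ⟨A.B + A.S, A.B + A.T⟩] v.mem s_10c2b5r.mem := by
      u_same
    have hunV : ShadowUntouched v.mem s_10c2b5r.mem := by v_untouched
    have hsameN : Mem.SameExcept ((init_blocksize.spec others frames A k).footprint u) v.mem s_10c2b5r.mem := by
      simp only [X86.User.Spec.footprint, vspec, hbq]
      rw [← hFP]
      refine widenWins hseg ?_
      intro w hw
      simp only [List.mem_cons, List.not_mem_nil, or_false] at hw
      rcases hw with rfl | rfl
      · exact Or.inr ⟨_, m_st, Nat.le_refl _, Nat.le_refl _⟩
      · exact Or.inr ⟨_, m_gap, Nat.le_refl _, Nat.le_refl _⟩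
    have hB' := hbody.step w_eq w_inv w_rsp ((w_kept .rbx rfl).trans c_rbx) ((w_kept .rbp rfl).trans c_rbp)
      ((w_kept .r12 rfl).trans c_r12) hfr hfn hsameN (hMv.frame (by omega) hf112 hunV)
    refine ReachVia.done ⟨hB', w_rip, ?_⟩
    rw [hnq, hbq]
    exact htabs.carry (Arena.Extends.refl A3) (by omega) hb hA hB hC

set_option maxRecDepth 8000 in
set_option maxHeartbeats 64000000 in
/-- **Segment 4c** (`atOom` 0x10c338 … `cut9` 0x10c345; line 1319): `return error(f, VORBIS_outofmem)`, whose return address IS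
the epilogue's cut point. From `AtOom` to `AtCut9` with rax = 0 and `f->error = 3`. -/
theorem seg4c {Lay : Layout} (hLay : Lay.hi = 0x1000000) {μ : Microarch} (hμ : UserX.MicroOK μ) {u₀ : State}
    (hcode : HasCodeNat Lay u₀ Vorbis.L.init_blocksize.entry Vorbis.Code.code_init_blocksize.nat Vorbis.L.init_blocksize.size)
    (h_err : ∀ (others : List Obj) (frames : List (Nat × FrameLayout)),
      Calls Lay μ Vorbis.WayInv (Vorbis.conv u₀) Vorbis.L.error.entry (Vorbis.Spec.error.spec others frames))
    (others : List Obj) (frames : List (Nat × FrameLayout)) (A : Arena) (k : Nat) (u : State) (ret : Word)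
    (A3 : Arena) (others3 : List Obj) (v : State) (hat : AtOom u₀ others frames A k u ret A3 others3 v) :
    ReachVia Lay μ Vorbis.WayInv v (AtCut9 u₀ others frames A k u ret A3 others3) := by
  obtain ⟨hbody, hrip⟩ := hat
  have he := hbody.entry
  have hpre := hbody.pre
  have he0 := he
  have hpre0 := hpre
  v_entry he
  obtain ⟨hap, hlive, hb, hld, hlogobj, hlogin⟩ := hpre
  have hlive0 := hlive
  have hsh := hap.shadow
  have hsp := hsh.rsp
  rw [arg32_def] at hb hld
  -- the two `int` arguments, named
  generalize hbq : (u.reg .rsi).toNat % 2 ^ 32 = b at hb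
  generalize hnq : (u.reg .rdx).toNat % 2 ^ 32 = n at hld
  -- where `*f` is; where the free gap of the arena is
  have hwhere := hlive.where_ hsh.inv hsh.offText (by decide)
  simp only [Vorbis.Off.sizeof.stb_vorbis] at hwhere hlive
  have hgap := obj_off_gap hlive hap.arena hsh.inv
  have hbounds := hap.arena.bounds
  have h1x := hap.arena.AR1x
  have htext : 0x119d40 ≤ A.B := hap.offText
  have hsx : (Word.ofBV (BitVec.signExtend 64 (Word.part .w32 (u.reg .rsi)))).toNat = b := by
    rw [← hbq, ← arg32_def]
    exact arg32_sext u .rsi (by rw [arg32_def]; omega)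
  have hnv : (Word.part .w32 (u.reg .rdx)).toNat = n := by
    rw [← hnq]
    exact Asan.part32_toNat _
  have hfacts := hld.isBlocksize.facts
  have hshlo : (shadowSpan (A.B + A.S) (A.B + A.T)).lo = 0xC00000 + (A.B + A.S) / 8 := rfl
  have hshhi : (shadowSpan (A.B + A.S) (A.B + A.T)).hi = 0xC00000 + (A.B + A.T + 7) / 8 := rfl
  -- the contract's footprint, named, and its windows
  obtain ⟨FP, hFP⟩ : ∃ FP : List Span, FP =
      [⟨(u.reg .rsp).toNat - 256, (u.reg .rsp).toNat⟩, ⟨(u.reg .rdi).toNat + 8, (u.reg .rdi).toNat + 12⟩, ⟨(u.reg .rdi).toNat + 128, (u.reg .rdi).toNat + 132⟩, ⟨(u.reg .rdi).toNat + 140, (u.reg .rdi).toNat + 144⟩, ⟨(u.reg .rdi).toNat + 1400 + 8 * b, (u.reg .rdi).toNat + 1408 + 8 * b⟩, ⟨(u.reg .rdi).toNat + 1416 + 8 * b, (u.reg .rdi).toNat + 1424 + 8 * b⟩, ⟨(u.reg .rdi).toNat + 1432 + 8 * b, (u.reg .rdi).toNat + 1440 + 8 * b⟩, ⟨(u.reg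 .rdi).toNat + 1448 + 8 * b, (u.reg .rdi).toNat + 1456 + 8 * b⟩, ⟨(u.reg .rdi).toNat + 1464 + 8 * b, (u.reg .rdi).toNat + 1472 + 8 * b⟩,
       ⟨A.B + A.S, A.B + A.T⟩, shadowSpan (A.B + A.S) (A.B + A.T)] := ⟨_, rfl⟩
  have m_st : (⟨(u.reg .rsp).toNat - 256, (u.reg .rsp).toNat⟩ : Span) ∈ FP := by rw [hFP]; simp only [List.mem_cons, true_or]
  have m_f140 : (⟨(u.reg .rdi).toNat + 140, (u.reg .rdi).toNat + 144⟩ : Span) ∈ FP := by rw [hFP]; simp only [List.mem_cons, true_or, or_true]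
  have m_A : (⟨(u.reg .rdi).toNat + 1400 + 8 * b, (u.reg .rdi).toNat + 1408 + 8 * b⟩ : Span) ∈ FP := by rw [hFP]; simp only [List.mem_cons, true_or, or_true]
  have m_B : (⟨(u.reg .rdi).toNat + 1416 + 8 * b, (u.reg .rdi).toNat + 1424 + 8 * b⟩ : Span) ∈ FP := by rw [hFP]; simp only [List.mem_cons, true_or, or_true]
  have m_C : (⟨(u.reg .rdi).toNat + 1432 + 8 * b, (u.reg .rdi).toNat + 1440 + 8 * b⟩ : Span) ∈ FP := by rw [hFP]; simp only [List.mem_cons, true_or, or_true]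
  have m_W : (⟨(u.reg .rdi).toNat + 1448 + 8 * b, (u.reg .rdi).toNat + 1456 + 8 * b⟩ : Span) ∈ FP := by rw [hFP]; simp only [List.mem_cons, true_or, or_true]
  have m_R : (⟨(u.reg .rdi).toNat + 1464 + 8 * b, (u.reg .rdi).toNat + 1472 + 8 * b⟩ : Span) ∈ FP := by rw [hFP]; simp only [List.mem_cons, true_or, or_true]
  have m_gap : (⟨A.B + A.S, A.B + A.T⟩ : Span) ∈ FP := by rw [hFP]; simp only [List.mem_cons, true_or, or_true]
  -- the present state: the walker reads these by type
  have hMv := hbody.mid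
  have c_rsp := hbody.rsp
  have c_rbx := hbody.rbx
  have c_rbp := hbody.rbp
  have c_r12 := hbody.r12
  have w_eq : Mem.EqOn Vorbis.L.textLo Vorbis.L.textHi u₀.mem v.mem := hbody.code
  have hdf : v.flags .df = false := (show abiInv _ from hbody.inv).1
  have hmx : v.mxcsr &&& 0x1F80 = 0x1F80 := (show abiInv _ from hbody.inv).2
  have hsse := Vorbis.sseOK_of_abiInv hbody.inv
  have c_rip : v.rip = atOom := hrip
  have herr := h_err others3 frames
  -- ── `error(f, VORBIS_outofmem)`, line 1319 ──
  u_walk hcode [hμ.vendor] span [Vorbis.L.textLo, Vorbis.L.textHi] side (v_side)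
  case call_inv => v_inv
  case pre_10c340 =>
    have hM : Carry others frames A ((u.reg .rsp).toNat - 88) (u.reg .rdi).toNat A3 others3 s_10c340.mem := by
      refine hMv.frame (by omega) ?_ ?_
      · u_memnorm
        u_eqon
      · v_untouched
    show ShadowPre others3 frames s_10c340 ∧ LiveIn others3 frames (s_10c340.reg .rdi).toNat Off.sizeof.stb_vorbis
    refine ⟨hM.shadowPre (by rw [w_rsp]; u_omega), ?_⟩
    rw [w_rdi]
    exact hM.liveIn hlive0
  · -- ── the return of `error` (0x10c345 = `cut9`) ──
    obtain ⟨hrax, hunE, herrv⟩ := w_post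
    have w_eq := Vorbis.conv_code_eqOn w_code
    simp only [X86.User.Spec.footprint, vspec, w_rsp_10c340, w_rdi_10c340] at w_same
    rw [w_mem_10c340] at w_same
    have hfr : Mem.EqOn ((u.reg .rsp).toNat - 64) ((u.reg .rsp).toNat + 8) v.mem s_10c340r.mem := by
      u_eqon
    have hfn : Mem.EqOn ((u.reg .rsp).toNat - 84) ((u.reg .rsp).toNat - 80) v.mem s_10c340r.mem := by
      u_eqon
    have hf112 : Mem.EqOn ((u.reg .rdi).toNat + 112) ((u.reg .rdi).toNat + 136) v.mem s_10c340r.mem := by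
      u_eqon
    have hseg : Mem.SameExcept
        [⟨(u.reg .rsp).toNat - 256, (u.reg .rsp).toNat⟩,
         ⟨(u.reg .rdi).toNat + 140, (u.reg .rdi).toNat + 144⟩] v.mem s_10c340r.mem := by
      u_same
    have hunV : ShadowUntouched v.mem s_10c340r.mem := by v_untouched
    have hsameN : Mem.SameExcept ((init_blocksize.spec others frames A k).footprint u) v.mem s_10c340r.mem := by
      simp only [X86.User.Spec.footprint, vspec, hbq]
      rw [← hFP]
      refine widenWins hseg ?_
      intro w hw
      simp only [List.mem_cons, List.not_mem_nil, or_false] at hw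
      rcases hw with rfl | rfl
      · exact Or.inr ⟨_, m_st, Nat.le_refl _, Nat.le_refl _⟩
      · exact Or.inr ⟨_, m_f140, Nat.le_refl _, Nat.le_refl _⟩
    have hB' := hbody.step w_eq w_inv w_rsp ((w_kept .rbx rfl).trans c_rbx) ((w_kept .rbp rfl).trans c_rbp)
      ((w_kept .r12 rfl).trans c_r12) hfr hfn hsameN (hMv.frame (by omega) hf112 hunV)
    refine ReachVia.done (AtErr.atCut9 ⟨hB', w_rip, hrax, ?_⟩)
    refine err_field (a := u.reg .rdi + 140) (by u_omega) ?_
    rw [w_rdi_10c340, w_rsi_10c340, Vorbis.toNat_ofBV32] at herrv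
    exact herrv

/-! ### Segments 6 and 8 -/

set_option maxRecDepth 8000 in
set_option maxHeartbeats 64000000 in
/-- **Segment 6** (`cut5` 0x10c2c6 … `cut6` 0x10c2f4, or `cut10` 0x10c361; lines 1321–1323): the checked store
`f->window[b] = rax`, the NULL test, then `compute_window(n, window[b])` (it writes into the new block only), or
`error(f, VORBIS_outofmem)`. From `AtCut5` to `AtCut6` (four tables) or `AtErr cut10`. -/
theorem seg6 {Lay : Layout} (hLay : Lay.hi = 0x1000000) {μ : Microarch} (hμ : UserX.MicroOK μ) {u₀ : State}
    (hcode : HasCodeNat Lay u₀ Vorbis.L.init_blocksize.entry Vorbis.Code.code_init_blocksize.nat Vorbis.L.init_blocksize.size)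
    (hstore8 : Asan.SmallCheck Lay μ Vorbis.WayInv (Vorbis.CodeOK u₀) [.rax, .rcx, .rdx] 8 Vorbis.L.__asan_store8_noabort.entry)
    (h_cw : ∀ (others : List Obj) (frames : List (Nat × FrameLayout)),
      Calls Lay μ Vorbis.WayInv (Vorbis.conv u₀) Vorbis.L.compute_window.entry (Vorbis.Spec.compute_window.spec others frames))
    (h_err : ∀ (others : List Obj) (frames : List (Nat × FrameLayout)),
      Calls Lay μ Vorbis.WayInv (Vorbis.conv u₀) Vorbis.L.error.entry (Vorbis.Spec.error.spec others frames))
    (others : List Obj) (frames : List (Nat × FrameLayout)) (A : Arena) (k : Nat) (u : State) (ret : Word)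
    (A5 : Arena) (others5 : List Obj) (v : State) (hat : AtCut5 u₀ others frames A k u ret A5 others5 v) :
    ReachVia Lay μ Vorbis.WayInv v (fun w => AtCut6 u₀ others frames A k u ret A5 others5 w ∨
      AtErr Vorbis.L.init_blocksize.cut10 u₀ others frames A k u ret A5 others5 w) := by
  obtain ⟨hbody, hrip, htabs, hres⟩ := hat
  have he := hbody.entry
  have hpre := hbody.pre
  have he0 := he
  have hpre0 := hpre
  v_entry he
  obtain ⟨hap, hlive, hb, hld, hlogobj, hlogin⟩ := hpre
  have hlive0 := hlive
  have hsh := hap.shadow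
  have hsp := hsh.rsp
  rw [arg32_def] at hb hld
  -- the two `int` arguments, named
  generalize hbq : (u.reg .rsi).toNat % 2 ^ 32 = b at hb
  generalize hnq : (u.reg .rdx).toNat % 2 ^ 32 = n at hld
  -- where `*f` is; where the free gap of the arena is
  have hwhere := hlive.where_ hsh.inv hsh.offText (by decide)
  simp only [Vorbis.Off.sizeof.stb_vorbis] at hwhere hlive
  have hgap := obj_off_gap hlive hap.arena hsh.inv
  have hbounds := hap.arena.bounds
  have h1x := hap.arena.AR1x
  have htext : 0x119d40 ≤ A.B := hap.offText
  have hsx : (Word.ofBV (BitVec.signExtend 64 (Word.part .w32 (u.reg .rsi)))).toNat = b := by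
    rw [← hbq, ← arg32_def]
    exact arg32_sext u .rsi (by rw [arg32_def]; omega)
  have hnv : (Word.part .w32 (u.reg .rdx)).toNat = n := by
    rw [← hnq]
    exact Asan.part32_toNat _
  have hfacts := hld.isBlocksize.facts
  have hshlo : (shadowSpan (A.B + A.S) (A.B + A.T)).lo = 0xC00000 + (A.B + A.S) / 8 := rfl
  have hshhi : (shadowSpan (A.B + A.S) (A.B + A.T)).hi = 0xC00000 + (A.B + A.T + 7) / 8 := rfl
  -- the contract's footprint, named, and its windows
  obtain ⟨FP, hFP⟩ : ∃ FP : List Span, FP =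
      [⟨(u.reg .rsp).toNat - 256, (u.reg .rsp).toNat⟩, ⟨(u.reg .rdi).toNat + 8, (u.reg .rdi).toNat + 12⟩, ⟨(u.reg .rdi).toNat + 128, (u.reg .rdi).toNat + 132⟩, ⟨(u.reg .rdi).toNat + 140, (u.reg .rdi).toNat + 144⟩, ⟨(u.reg .rdi).toNat + 1400 + 8 * b, (u.reg .rdi).toNat + 1408 + 8 * b⟩, ⟨(u.reg .rdi).toNat + 1416 + 8 * b, (u.reg .rdi).toNat + 1424 + 8 * b⟩, ⟨(u.reg .rdi).toNat + 1432 + 8 * b, (u.reg .rdi).toNat + 1440 + 8 * b⟩, ⟨(u.reg .rdi).toNat + 1448 + 8 * b, (u.reg .rdi).toNat + 1456 + 8 * b⟩, ⟨(u.reg .rdi).toNat + 1464 + 8 * b, (u.reg .rdi).toNat + 1472 + 8 * b⟩,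
       ⟨A.B + A.S, A.B + A.T⟩, shadowSpan (A.B + A.S) (A.B + A.T)] := ⟨_, rfl⟩
  have m_st : (⟨(u.reg .rsp).toNat - 256, (u.reg .rsp).toNat⟩ : Span) ∈ FP := by rw [hFP]; simp only [List.mem_cons, true_or]
  have m_f140 : (⟨(u.reg .rdi).toNat + 140, (u.reg .rdi).toNat + 144⟩ : Span) ∈ FP := by rw [hFP]; simp only [List.mem_cons, true_or, or_true]
  have m_A : (⟨(u.reg .rdi).toNat + 1400 + 8 * b, (u.reg .rdi).toNat + 1408 + 8 * b⟩ : Span) ∈ FP := by rw [hFP]; simp only [List.mem_cons, true_or, or_true]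
  have m_B : (⟨(u.reg .rdi).toNat + 1416 + 8 * b, (u.reg .rdi).toNat + 1424 + 8 * b⟩ : Span) ∈ FP := by rw [hFP]; simp only [List.mem_cons, true_or, or_true]
  have m_C : (⟨(u.reg .rdi).toNat + 1432 + 8 * b, (u.reg .rdi).toNat + 1440 + 8 * b⟩ : Span) ∈ FP := by rw [hFP]; simp only [List.mem_cons, true_or, or_true]
  have m_W : (⟨(u.reg .rdi).toNat + 1448 + 8 * b, (u.reg .rdi).toNat + 1456 + 8 * b⟩ : Span) ∈ FP := by rw [hFP]; simp only [List.mem_cons, true_or, or_true]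
  have m_R : (⟨(u.reg .rdi).toNat + 1464 + 8 * b, (u.reg .rdi).toNat + 1472 + 8 * b⟩ : Span) ∈ FP := by rw [hFP]; simp only [List.mem_cons, true_or, or_true]
  have m_gap : (⟨A.B + A.S, A.B + A.T⟩ : Span) ∈ FP := by rw [hFP]; simp only [List.mem_cons, true_or, or_true]
  -- the present state: the walker reads these by type
  have hMv := hbody.mid
  have c_rsp := hbody.rsp
  have c_rbx := hbody.rbx
  have c_rbp := hbody.rbp
  have c_r12 := hbody.r12
  have w_eq : Mem.EqOn Vorbis.L.textLo Vorbis.L.textHi u₀.mem v.mem := hbody.code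
  have hdf : v.flags .df = false := (show abiInv _ from hbody.inv).1
  have hmx : v.mxcsr &&& 0x1F80 = 0x1F80 := (show abiInv _ from hbody.inv).2
  have hsse := Vorbis.sseOK_of_abiInv hbody.inv
  have c_rip : v.rip = Vorbis.L.init_blocksize.cut5 := hrip
  rw [hnq, hbq] at htabs
  rw [hnq] at hres
  obtain ⟨pW, c_rax⟩ : ∃ z, v.reg .rax = z := ⟨_, rfl⟩
  rw [c_rax] at hres
  have hcw := h_cw others5 frames
  have herr := h_err others5 frames
  -- ── check + store `f->window[b]`, the NULL test, `compute_window(n, window[b])` | `error(f, 3)`: lines 1321–1323 ──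
  u_walk hcode [hμ.vendor] span [Vorbis.L.textLo, Vorbis.L.textHi] side (v_side)
  case check_10c2db =>
    -- the check of the store `f->window[b] = …`: inside `*f`
    have hun : ShadowUntouched v.mem s_10c2db.mem := by v_untouched
    exact (hMv.liveIn hlive).accSmall hMv.shadow hun _ 8 (by decide) (by u_omega) (by u_omega)
  case call_inv => v_inv
  case pre_10c35c =>
    -- `error(f, VORBIS_outofmem)`: the shadow layer, `*f` live
    have hM : Carry others frames A ((u.reg .rsp).toNat - 88) (u.reg .rdi).toNat A5 others5 s_10c35c.mem := by
      refine hMv.frame (by omega) ?_ ?_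
      · u_memnorm
        u_eqon
      · v_untouched
    show ShadowPre others5 frames s_10c35c ∧ LiveIn others5 frames (s_10c35c.reg .rdi).toNat Off.sizeof.stb_vorbis
    refine ⟨hM.shadowPre (by rw [w_rsp]; u_omega), ?_⟩
    rw [w_rdi]
    exact hM.liveIn hlive0
  case call_inv => v_inv
  case pre_10c2ef =>
    -- `compute_window(n, window[b])`: the new block of `2n` bytes is live
    have hM : Carry others frames A ((u.reg .rsp).toNat - 88) (u.reg .rdi).toNat A5 others5 s_10c2ef.mem := by
      refine hMv.frame (by omega) ?_ ?_
      · u_memnorm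
        u_eqon
      · v_untouched
    have hpS : Since A A5 ⟨pW.toNat, 2 * n⟩ := by
      rcases hres with h0 | h1
      · exact absurd (by rw [h0]; rfl) hbr_10c2e8
      · exact h1.1
    show ShadowPre others5 frames s_10c2ef ∧ arg32 s_10c2ef .rdi < 2 ^ 31 ∧
      LiveBytes others5 frames (s_10c2ef.reg .rsi).toNat (4 * (arg32 s_10c2ef .rdi / 2))
    have c_arg : arg32 s_10c2ef .rdi = n := by
      rw [arg32_def, w_rdi, Vorbis.toNat_ofBV32, hnv]
      exact Nat.mod_eq_of_lt (by omega)
    refine ⟨hM.shadowPre (by rw [w_rsp]; u_omega), ?_, ?_⟩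
    · rw [c_arg]
      omega
    · have e : 4 * (n / 2) = 2 * n := by omega
      rw [c_arg, w_rsi, e]
      exact LiveBytes.of_liveIn (hM.since_live hpS)
  · -- ── the out-of-memory return (0x10c361 = `cut10`): `AtErr` ──
    obtain ⟨hrax, hunE, herrv⟩ := w_post
    have w_eq := Vorbis.conv_code_eqOn w_code
    simp only [X86.User.Spec.footprint, vspec, w_rsp_10c35c, w_rdi_10c35c] at w_same
    rw [w_mem_10c35c] at w_same
    have hfr : Mem.EqOn ((u.reg .rsp).toNat - 64) ((u.reg .rsp).toNat + 8) v.mem s_10c35cr.mem := by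
      u_eqon
    have hfn : Mem.EqOn ((u.reg .rsp).toNat - 84) ((u.reg .rsp).toNat - 80) v.mem s_10c35cr.mem := by
      u_eqon
    have hf112 : Mem.EqOn ((u.reg .rdi).toNat + 112) ((u.reg .rdi).toNat + 136) v.mem s_10c35cr.mem := by
      u_eqon
    have hseg : Mem.SameExcept
        [⟨(u.reg .rsp).toNat - 256, (u.reg .rsp).toNat⟩,
         ⟨(u.reg .rdi).toNat + 140, (u.reg .rdi).toNat + 144⟩,
         ⟨(u.reg .rdi).toNat + 1448 + 8 * b, (u.reg .rdi).toNat + 1456 + 8 * b⟩] v.mem s_10c35cr.mem := by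
      u_same
    have hunV : ShadowUntouched v.mem s_10c35cr.mem := by v_untouched
    have hsameN : Mem.SameExcept ((init_blocksize.spec others frames A k).footprint u) v.mem s_10c35cr.mem := by
      simp only [X86.User.Spec.footprint, vspec, hbq]
      rw [← hFP]
      refine widenWins hseg ?_
      intro w hw
      simp only [List.mem_cons, List.not_mem_nil, or_false] at hw
      rcases hw with rfl | rfl | rfl
      · exact Or.inr ⟨_, m_st, Nat.le_refl _, Nat.le_refl _⟩
      · exact Or.inr ⟨_, m_f140, Nat.le_refl _, Nat.le_refl _⟩
      · exact Or.inr ⟨_, m_W, Nat.le_refl _, Nat.le_refl _⟩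
    have hB' := hbody.step w_eq w_inv w_rsp ((w_kept .rbx rfl).trans c_rbx) ((w_kept .rbp rfl).trans c_rbp)
      ((w_kept .r12 rfl).trans c_r12) hfr hfn hsameN (hMv.frame (by omega) hf112 hunV)
    refine ReachVia.done (Or.inr ⟨hB', w_rip, hrax, ?_⟩)
    refine err_field (a := u.reg .rdi + 140) (by u_omega) ?_
    rw [w_rdi_10c35c, w_rsi_10c35c, Vorbis.toNat_ofBV32] at herrv
    exact herrv
  · -- ── the return of `compute_window` (0x10c2f4 = `cut6`): `AtCut6` ──
    obtain ⟨hpS, hp1, hp2⟩ : Since A A5 ⟨pW.toNat, 2 * n⟩ ∧ A.B + A.S + 32 ≤ pW.toNat ∧ pW.toNat + 2 * n ≤ A.B + A.T := by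
      rcases hres with h0 | h1
      · exact absurd (by rw [h0]; rfl) hbr_10c2e8
      · exact h1
    have w_eq := Vorbis.conv_code_eqOn w_code
    simp only [X86.User.Spec.footprint, vspec, w_rsp_10c2ef, w_rsi_10c2ef] at w_same
    have c_n : 4 * ((s_10c2ef.reg .rdi).toNat % 2 ^ 32 / 2) = 2 * n := by
      rw [w_rdi_10c2ef, Vorbis.toNat_ofBV32, hnv]
      omega
    rw [c_n] at w_same
    -- the pointer `f->window[b]` as it is at the call
    have G_W : UInt64.ofNat (s_10c2ef.mem.readLE
        (u.reg .rdi + (Word.ofBV (BitVec.signExtend 64 (Word.part .w32 (u.reg .rsi))) + 180) * 8 + 8) 8) = pW := by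
      u_resolve
    rw [w_mem_10c2ef] at w_same
    have hfr : Mem.EqOn ((u.reg .rsp).toNat - 64) ((u.reg .rsp).toNat + 8) v.mem s_10c2efr.mem := by
      u_eqon
    have hfn : Mem.EqOn ((u.reg .rsp).toNat - 84) ((u.reg .rsp).toNat - 80) v.mem s_10c2efr.mem := by
      u_eqon
    have hf112 : Mem.EqOn ((u.reg .rdi).toNat + 112) ((u.reg .rdi).toNat + 136) v.mem s_10c2efr.mem := by
      u_eqon
    have hA : Mem.EqOn ((u.reg .rdi).toNat + 1400 + 8 * b) ((u.reg .rdi).toNat + 1408 + 8 * b) v.mem s_10c2efr.mem := by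
      u_eqon
    have hB : Mem.EqOn ((u.reg .rdi).toNat + 1416 + 8 * b) ((u.reg .rdi).toNat + 1424 + 8 * b) v.mem s_10c2efr.mem := by
      u_eqon
    have hC : Mem.EqOn ((u.reg .rdi).toNat + 1432 + 8 * b) ((u.reg .rdi).toNat + 1440 + 8 * b) v.mem s_10c2efr.mem := by
      u_eqon
    have hW : Mem.EqOn ((u.reg .rdi).toNat + 1448 + 8 * b) ((u.reg .rdi).toNat + 1456 + 8 * b) s_10c2ef.mem s_10c2efr.mem := by
      rw [w_mem_10c2ef]
      u_eqon
    have eW : stb_vorbis.window s_10c2efr.mem (u.reg .rdi).toNat b = pW.toNat := by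
      simp only [vacc, voff]
      exact ptr_of_slot (by u_omega) (slot64_of_eqOn hW G_W (by u_omega) (by u_omega) (by u_omega))
    have hseg : Mem.SameExcept
        [⟨(u.reg .rsp).toNat - 256, (u.reg .rsp).toNat⟩,
         ⟨(u.reg .rdi).toNat + 1448 + 8 * b, (u.reg .rdi).toNat + 1456 + 8 * b⟩,
         ⟨A.B + A.S, A.B + A.T⟩] v.mem s_10c2efr.mem := by
      u_same
    have hunV : ShadowUntouched v.mem s_10c2efr.mem := by v_untouched
    have hsameN : Mem.SameExcept ((init_blocksize.spec others frames A k).footprint u) v.mem s_10c2efr.mem := by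
      simp only [X86.User.Spec.footprint, vspec, hbq]
      rw [← hFP]
      refine widenWins hseg ?_
      intro w hw
      simp only [List.mem_cons, List.not_mem_nil, or_false] at hw
      rcases hw with rfl | rfl | rfl
      · exact Or.inr ⟨_, m_st, Nat.le_refl _, Nat.le_refl _⟩
      · exact Or.inr ⟨_, m_W, Nat.le_refl _, Nat.le_refl _⟩
      · exact Or.inr ⟨_, m_gap, Nat.le_refl _, Nat.le_refl _⟩
    have hB' := hbody.step w_eq w_inv w_rsp ((w_kept .rbx rfl).trans c_rbx) ((w_kept .rbp rfl).trans c_rbp)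
      ((w_kept .r12 rfl).trans c_r12) hfr hfn hsameN (hMv.frame (by omega) hf112 hunV)
    refine ReachVia.done (Or.inl ⟨hB', w_rip, ?_, ?_⟩)
    · rw [hnq, hbq]
      exact htabs.carry (Arena.Extends.refl A5) (by omega) hb hA hB hC
    · rw [hnq, hbq, eW]
      exact hpS

set_option maxRecDepth 8000 in
set_option maxHeartbeats 64000000 in
/-- **Segment 8** (`cut7` 0x10c302 … `cut8` 0x10c331, or `cut11` 0x10c370; lines 1324–1326): the checked store
`f->bit_reverse[b] = rax`, the NULL test, then `compute_bitreverse(n, bit_reverse[b])` (its post is M4), or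
`error(f, VORBIS_outofmem)`. From `AtCut7` to `AtCut8` (all five tables: `Mdct.Tables`, `Mdct.RevOK`) or `AtErr cut11`. -/
theorem seg8 {Lay : Layout} (hLay : Lay.hi = 0x1000000) {μ : Microarch} (hμ : UserX.MicroOK μ) {u₀ : State}
    (hcode : HasCodeNat Lay u₀ Vorbis.L.init_blocksize.entry Vorbis.Code.code_init_blocksize.nat Vorbis.L.init_blocksize.size)
    (hstore8 : Asan.SmallCheck Lay μ Vorbis.WayInv (Vorbis.CodeOK u₀) [.rax, .rcx, .rdx] 8 Vorbis.L.__asan_store8_noabort.entry)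
    (h_cb : ∀ (others : List Obj) (frames : List (Nat × FrameLayout)) (k : Nat),
      Calls Lay μ Vorbis.WayInv (Vorbis.conv u₀) Vorbis.L.compute_bitreverse.entry (Vorbis.Spec.compute_bitreverse.spec others frames k))
    (h_err : ∀ (others : List Obj) (frames : List (Nat × FrameLayout)),
      Calls Lay μ Vorbis.WayInv (Vorbis.conv u₀) Vorbis.L.error.entry (Vorbis.Spec.error.spec others frames))
    (others : List Obj) (frames : List (Nat × FrameLayout)) (A : Arena) (k : Nat) (u : State) (ret : Word)
    (A7 : Arena) (others7 : List Obj) (v : State) (hat : AtCut7 u₀ others frames A k u ret A7 others7 v) :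
    ReachVia Lay μ Vorbis.WayInv v (fun w => AtCut8 u₀ others frames A k u ret A7 others7 w ∨
      AtErr Vorbis.L.init_blocksize.cut11 u₀ others frames A k u ret A7 others7 w) := by
  obtain ⟨hbody, hrip, htabs, htW, hres⟩ := hat
  have he := hbody.entry
  have hpre := hbody.pre
  have he0 := he
  have hpre0 := hpre
  v_entry he
  obtain ⟨hap, hlive, hb, hld, hlogobj, hlogin⟩ := hpre
  have hlive0 := hlive
  have hsh := hap.shadow
  have hsp := hsh.rsp
  rw [arg32_def] at hb hld
  -- the two `int` arguments, named
  generalize hbq : (u.reg .rsi).toNat % 2 ^ 32 = b at hb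
  generalize hnq : (u.reg .rdx).toNat % 2 ^ 32 = n at hld
  -- where `*f` is; where the free gap of the arena is
  have hwhere := hlive.where_ hsh.inv hsh.offText (by decide)
  simp only [Vorbis.Off.sizeof.stb_vorbis] at hwhere hlive
  have hgap := obj_off_gap hlive hap.arena hsh.inv
  have hbounds := hap.arena.bounds
  have h1x := hap.arena.AR1x
  have htext : 0x119d40 ≤ A.B := hap.offText
  have hsx : (Word.ofBV (BitVec.signExtend 64 (Word.part .w32 (u.reg .rsi)))).toNat = b := by
    rw [← hbq, ← arg32_def]
    exact arg32_sext u .rsi (by rw [arg32_def]; omega)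
  have hnv : (Word.part .w32 (u.reg .rdx)).toNat = n := by
    rw [← hnq]
    exact Asan.part32_toNat _
  have hfacts := hld.isBlocksize.facts
  have hshlo : (shadowSpan (A.B + A.S) (A.B + A.T)).lo = 0xC00000 + (A.B + A.S) / 8 := rfl
  have hshhi : (shadowSpan (A.B + A.S) (A.B + A.T)).hi = 0xC00000 + (A.B + A.T + 7) / 8 := rfl
  -- the contract's footprint, named, and its windows
  obtain ⟨FP, hFP⟩ : ∃ FP : List Span, FP =
      [⟨(u.reg .rsp).toNat - 256, (u.reg .rsp).toNat⟩, ⟨(u.reg .rdi).toNat + 8, (u.reg .rdi).toNat + 12⟩, ⟨(u.reg .rdi).toNat + 128, (u.reg .rdi).toNat + 132⟩, ⟨(u.reg .rdi).toNat + 140, (u.reg .rdi).toNat + 144⟩, ⟨(u.reg .rdi).toNat + 1400 + 8 * b, (u.reg .rdi).toNat + 1408 + 8 * b⟩, ⟨(u.reg .rdi).toNat + 1416 + 8 * b, (u.reg .rdi).toNat + 1424 + 8 * b⟩, ⟨(u.reg .rdi).toNat + 1432 + 8 * b, (u.reg .rdi).toNat + 1440 + 8 * b⟩, ⟨(u.reg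 .rdi).toNat + 1448 + 8 * b, (u.reg .rdi).toNat + 1456 + 8 * b⟩, ⟨(u.reg .rdi).toNat + 1464 + 8 * b, (u.reg .rdi).toNat + 1472 + 8 * b⟩,
       ⟨A.B + A.S, A.B + A.T⟩, shadowSpan (A.B + A.S) (A.B + A.T)] := ⟨_, rfl⟩
  have m_st : (⟨(u.reg .rsp).toNat - 256, (u.reg .rsp).toNat⟩ : Span) ∈ FP := by rw [hFP]; simp only [List.mem_cons, true_or]
  have m_f140 : (⟨(u.reg .rdi).toNat + 140, (u.reg .rdi).toNat + 144⟩ : Span) ∈ FP := by rw [hFP]; simp only [List.mem_cons, true_or, or_true]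
  have m_A : (⟨(u.reg .rdi).toNat + 1400 + 8 * b, (u.reg .rdi).toNat + 1408 + 8 * b⟩ : Span) ∈ FP := by rw [hFP]; simp only [List.mem_cons, true_or, or_true]
  have m_B : (⟨(u.reg .rdi).toNat + 1416 + 8 * b, (u.reg .rdi).toNat + 1424 + 8 * b⟩ : Span) ∈ FP := by rw [hFP]; simp only [List.mem_cons, true_or, or_true]
  have m_C : (⟨(u.reg .rdi).toNat + 1432 + 8 * b, (u.reg .rdi).toNat + 1440 + 8 * b⟩ : Span) ∈ FP := by rw [hFP]; simp only [List.mem_cons, true_or, or_true]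
  have m_W : (⟨(u.reg .rdi).toNat + 1448 + 8 * b, (u.reg .rdi).toNat + 1456 + 8 * b⟩ : Span) ∈ FP := by rw [hFP]; simp only [List.mem_cons, true_or, or_true]
  have m_R : (⟨(u.reg .rdi).toNat + 1464 + 8 * b, (u.reg .rdi).toNat + 1472 + 8 * b⟩ : Span) ∈ FP := by rw [hFP]; simp only [List.mem_cons, true_or, or_true]
  have m_gap : (⟨A.B + A.S, A.B + A.T⟩ : Span) ∈ FP := by rw [hFP]; simp only [List.mem_cons, true_or, or_true]
  -- the present state: the walker reads these by type
  have hMv := hbody.mid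
  have c_rsp := hbody.rsp
  have c_rbx := hbody.rbx
  have c_rbp := hbody.rbp
  have c_r12 := hbody.r12
  have w_eq : Mem.EqOn Vorbis.L.textLo Vorbis.L.textHi u₀.mem v.mem := hbody.code
  have hdf : v.flags .df = false := (show abiInv _ from hbody.inv).1
  have hmx : v.mxcsr &&& 0x1F80 = 0x1F80 := (show abiInv _ from hbody.inv).2
  have hsse := Vorbis.sseOK_of_abiInv hbody.inv
  have c_rip : v.rip = Vorbis.L.init_blocksize.cut7 := hrip
  rw [hnq, hbq] at htabs htW
  rw [hnq] at hres
  obtain ⟨pR, c_rax⟩ : ∃ z, v.reg .rax = z := ⟨_, rfl⟩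
  rw [c_rax] at hres
  have hflog := obj_off_log2 hlive hlogobj hsh.inv
  have hlogV : Log2_4In v.mem := log2_of_same hpre0 hbody.same
  -- `movsxd r12, r12d` leaves r12 as it was: `b < 2`
  have hr12x : Word.ofBV (BitVec.signExtend 64 (Word.part .w32 (u.reg .rsi))) = Word.ofBV (Word.part .w32 (u.reg .rsi)) := by
    apply UInt64.toNat_inj.mp
    rw [hsx, Vorbis.toNat_ofBV32, Asan.part32_toNat, hbq]
  have hcb := h_cb others7 frames k
  have herr := h_err others7 frames
  -- ── check + store `f->bit_reverse[b]`, the NULL test, `compute_bitreverse(n, bit_reverse[b])` | `error(f, 3)`: lines 1324–1326 ──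
  u_walk hcode [hμ.vendor] span [Vorbis.L.textLo, Vorbis.L.textHi] side (v_side)
  case check_10c318 =>
    -- the check of the store `f->bit_reverse[b] = …`: inside `*f`
    have hun : ShadowUntouched v.mem s_10c318.mem := by v_untouched
    exact (hMv.liveIn hlive).accSmall hMv.shadow hun _ 8 (by decide) (by u_omega) (by u_omega)
  case call_inv => v_inv
  case pre_10c36b =>
    -- `error(f, VORBIS_outofmem)`: the shadow layer, `*f` live
    have hM : Carry others frames A ((u.reg .rsp).toNat - 88) (u.reg .rdi).toNat A7 others7 s_10c36b.mem := by
      refine hMv.frame (by omega) ?_ ?_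
      · u_memnorm
        u_eqon
      · v_untouched
    show ShadowPre others7 frames s_10c36b ∧ LiveIn others7 frames (s_10c36b.reg .rdi).toNat Off.sizeof.stb_vorbis
    refine ⟨hM.shadowPre (by rw [w_rsp]; u_omega), ?_⟩
    rw [w_rdi]
    exact hM.liveIn hlive0
  case call_inv => v_inv
  case pre_10c32c =>
    -- `compute_bitreverse(n, bit_reverse[b])`: the new block of `n / 4` bytes is live, `log2_4` is as at the entry
    have hM : Carry others frames A ((u.reg .rsp).toNat - 88) (u.reg .rdi).toNat A7 others7 s_10c32c.mem := by
      refine hMv.frame (by omega) ?_ ?_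
      · u_memnorm
        u_eqon
      · v_untouched
    have hpS : Since A A7 ⟨pR.toNat, n / 4⟩ := by
      rcases hres with h0 | h1
      · exact absurd (by rw [h0]; rfl) hbr_10c325
      · exact h1.1
    have hlogS : Log2_4In s_10c32c.mem := by
      refine log2_frame hlogV ?_
      u_memnorm
      u_eqon
    show ShadowPre others7 frames s_10c32c ∧ Mdct.Ld (arg32 s_10c32c .rdi) k ∧
      LiveBytes others7 frames (s_10c32c.reg .rsi).toNat (arg32 s_10c32c .rdi / 4) ∧
      Vorbis.Globals.log2_4.obj ∈ others7 ∧ Log2_4In s_10c32c.mem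
    have c_arg : arg32 s_10c32c .rdi = n := by
      rw [arg32_def, w_rdi, Vorbis.toNat_ofBV32, hnv]
      exact Nat.mod_eq_of_lt (by omega)
    refine ⟨hM.shadowPre (by rw [w_rsp]; u_omega), ?_, ?_, hMv.sub _ hlogobj, hlogS⟩
    · rw [c_arg]
      exact hld
    · rw [c_arg, w_rsi]
      exact LiveBytes.of_liveIn (hM.since_live hpS)
  · -- ── the out-of-memory return (0x10c370 = `cut11`): `AtErr` ──
    obtain ⟨hrax, hunE, herrv⟩ := w_post
    have w_eq := Vorbis.conv_code_eqOn w_code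
    simp only [X86.User.Spec.footprint, vspec, w_rsp_10c36b, w_rdi_10c36b] at w_same
    rw [w_mem_10c36b] at w_same
    have hfr : Mem.EqOn ((u.reg .rsp).toNat - 64) ((u.reg .rsp).toNat + 8) v.mem s_10c36br.mem := by
      u_eqon
    have hfn : Mem.EqOn ((u.reg .rsp).toNat - 84) ((u.reg .rsp).toNat - 80) v.mem s_10c36br.mem := by
      u_eqon
    have hf112 : Mem.EqOn ((u.reg .rdi).toNat + 112) ((u.reg .rdi).toNat + 136) v.mem s_10c36br.mem := by
      u_eqon
    have hseg : Mem.SameExcept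
        [⟨(u.reg .rsp).toNat - 256, (u.reg .rsp).toNat⟩,
         ⟨(u.reg .rdi).toNat + 140, (u.reg .rdi).toNat + 144⟩,
         ⟨(u.reg .rdi).toNat + 1464 + 8 * b, (u.reg .rdi).toNat + 1472 + 8 * b⟩] v.mem s_10c36br.mem := by
      u_same
    have hunV : ShadowUntouched v.mem s_10c36br.mem := by v_untouched
    have hsameN : Mem.SameExcept ((init_blocksize.spec others frames A k).footprint u) v.mem s_10c36br.mem := by
      simp only [X86.User.Spec.footprint, vspec, hbq]
      rw [← hFP]
      refine widenWins hseg ?_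
      intro w hw
      simp only [List.mem_cons, List.not_mem_nil, or_false] at hw
      rcases hw with rfl | rfl | rfl
      · exact Or.inr ⟨_, m_st, Nat.le_refl _, Nat.le_refl _⟩
      · exact Or.inr ⟨_, m_f140, Nat.le_refl _, Nat.le_refl _⟩
      · exact Or.inr ⟨_, m_R, Nat.le_refl _, Nat.le_refl _⟩
    have hB' := hbody.step w_eq w_inv w_rsp ((w_kept .rbx rfl).trans c_rbx) ((w_kept .rbp rfl).trans c_rbp)
      (w_r12.trans hr12x) hfr hfn hsameN (hMv.frame (by omega) hf112 hunV)
    refine ReachVia.done (Or.inr ⟨hB', w_rip, hrax, ?_⟩)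
    refine err_field (a := u.reg .rdi + 140) (by u_omega) ?_
    rw [w_rdi_10c36b, w_rsi_10c36b, Vorbis.toNat_ofBV32] at herrv
    exact herrv
  · -- ── the return of `compute_bitreverse` (0x10c331 = `cut8`): `AtCut8` ──
    obtain ⟨hpS, hp1, hp2⟩ : Since A A7 ⟨pR.toNat, n / 4⟩ ∧ A.B + A.S + 32 ≤ pR.toNat ∧ pR.toNat + n / 4 ≤ A.B + A.T := by
      rcases hres with h0 | h1
      · exact absurd (by rw [h0]; rfl) hbr_10c325
      · exact h1
    obtain ⟨hunE, hrev⟩ := w_post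
    have w_eq := Vorbis.conv_code_eqOn w_code
    simp only [X86.User.Spec.footprint, vspec, w_rsp_10c32c, w_rsi_10c32c] at w_same
    have c_n : (s_10c32c.reg .rdi).toNat % 2 ^ 32 = n := by
      rw [w_rdi_10c32c, Vorbis.toNat_ofBV32, hnv]
      exact Nat.mod_eq_of_lt (by omega)
    rw [c_n] at w_same
    rw [arg32_def, c_n, w_rsi_10c32c] at hrev
    -- the pointer `f->bit_reverse[b]` as it is at the call
    have G_R : UInt64.ofNat (s_10c32c.mem.readLE
        (u.reg .rdi + (Word.ofBV (BitVec.signExtend 64 (Word.part .w32 (u.reg .rsi))) + 182) * 8 + 8) 8) = pR := by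
      u_resolve
    rw [w_mem_10c32c] at w_same
    have hfr : Mem.EqOn ((u.reg .rsp).toNat - 64) ((u.reg .rsp).toNat + 8) v.mem s_10c32cr.mem := by
      u_eqon
    have hfn : Mem.EqOn ((u.reg .rsp).toNat - 84) ((u.reg .rsp).toNat - 80) v.mem s_10c32cr.mem := by
      u_eqon
    have hf112 : Mem.EqOn ((u.reg .rdi).toNat + 112) ((u.reg .rdi).toNat + 136) v.mem s_10c32cr.mem := by
      u_eqon
    have hA : Mem.EqOn ((u.reg .rdi).toNat + 1400 + 8 * b) ((u.reg .rdi).toNat + 1408 + 8 * b) v.mem s_10c32cr.mem := by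
      u_eqon
    have hB : Mem.EqOn ((u.reg .rdi).toNat + 1416 + 8 * b) ((u.reg .rdi).toNat + 1424 + 8 * b) v.mem s_10c32cr.mem := by
      u_eqon
    have hC : Mem.EqOn ((u.reg .rdi).toNat + 1432 + 8 * b) ((u.reg .rdi).toNat + 1440 + 8 * b) v.mem s_10c32cr.mem := by
      u_eqon
    have hW : Mem.EqOn ((u.reg .rdi).toNat + 1448 + 8 * b) ((u.reg .rdi).toNat + 1456 + 8 * b) v.mem s_10c32cr.mem := by
      u_eqon
    have hR : Mem.EqOn ((u.reg .rdi).toNat + 1464 + 8 * b) ((u.reg .rdi).toNat + 1472 + 8 * b) s_10c32c.mem s_10c32cr.mem := by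
      rw [w_mem_10c32c]
      u_eqon
    have eW : stb_vorbis.window s_10c32cr.mem (u.reg .rdi).toNat b = stb_vorbis.window v.mem (u.reg .rdi).toNat b := by
      simp only [vacc, voff]
      exact ptr_of_eqOn (a := (u.reg .rdi).toNat + 1448 + 8 * b) hW (by omega) (by omega)
    have eR : stb_vorbis.bit_reverse s_10c32cr.mem (u.reg .rdi).toNat b = pR.toNat := by
      simp only [vacc, voff]
      exact ptr_of_slot (by u_omega) (slot64_of_eqOn hR G_R (by u_omega) (by u_omega) (by u_omega))
    have hseg : Mem.SameExcept
        [⟨(u.reg .rsp).toNat - 256, (u.reg .rsp).toNat⟩,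
         ⟨(u.reg .rdi).toNat + 1464 + 8 * b, (u.reg .rdi).toNat + 1472 + 8 * b⟩,
         ⟨A.B + A.S, A.B + A.T⟩] v.mem s_10c32cr.mem := by
      u_same
    have hunV : ShadowUntouched v.mem s_10c32cr.mem := by v_untouched
    have hsameN : Mem.SameExcept ((init_blocksize.spec others frames A k).footprint u) v.mem s_10c32cr.mem := by
      simp only [X86.User.Spec.footprint, vspec, hbq]
      rw [← hFP]
      refine widenWins hseg ?_
      intro w hw
      simp only [List.mem_cons, List.not_mem_nil, or_false] at hw
      rcases hw with rfl | rfl | rfl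
      · exact Or.inr ⟨_, m_st, Nat.le_refl _, Nat.le_refl _⟩
      · exact Or.inr ⟨_, m_R, Nat.le_refl _, Nat.le_refl _⟩
      · exact Or.inr ⟨_, m_gap, Nat.le_refl _, Nat.le_refl _⟩
    have hB' := hbody.step w_eq w_inv w_rsp ((w_kept .rbx rfl).trans c_rbx) ((w_kept .rbp rfl).trans c_rbp)
      (w_r12.trans hr12x) hfr hfn hsameN (hMv.frame (by omega) hf112 hunV)
    have htabs' := htabs.carry (Arena.Extends.refl A7) (by omega) hb hA hB hC
    refine ReachVia.done (Or.inl ⟨hB', w_rip, ?_, ?_⟩)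
    · simp only [arg32_def, hnq, hbq]
      refine ⟨htabs'.tA, htabs'.tB, htabs'.tC, ?_, ?_⟩
      · rw [eW]
        exact htW
      · rw [eR]
        exact hpS
    · simp only [arg32_def, hnq, hbq]
      rw [eR]
      exact hrev

/-! ### The composition -/

/-- **The whole function**: the segments chained by `ReachVia.trans`, from the contract's entry state to its `Returned`. The ghost
arena and live list of each cut (`∃ A' others'`) are opened between two segments. -/
theorem whole {Lay : Layout} (hLay : Lay.hi = 0x1000000) {μ : Microarch} (hμ : UserX.MicroOK μ) {u₀ : State}
    (hcode : HasCodeNat Lay u₀ Vorbis.L.init_blocksize.entry Vorbis.Code.code_init_blocksize.nat Vorbis.L.init_blocksize.size)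
    (h_sm : ∀ (others : List Obj) (frames : List (Nat × FrameLayout)) (A : Arena),
      Calls Lay μ Vorbis.WayInv (Vorbis.conv u₀) Vorbis.L.setup_malloc.entry (Vorbis.Spec.setup_malloc.spec others frames A))
    (hstore8 : Asan.SmallCheck Lay μ Vorbis.WayInv (Vorbis.CodeOK u₀) [.rax, .rcx, .rdx] 8 Vorbis.L.__asan_store8_noabort.entry)
    (hload8 : Asan.SmallCheck Lay μ Vorbis.WayInv (Vorbis.CodeOK u₀) [.rax, .rcx, .rdx] 8 Vorbis.L.__asan_load8_noabort.entry)
    (h_tw : ∀ (others : List Obj) (frames : List (Nat × FrameLayout)),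
      Calls Lay μ Vorbis.WayInv (Vorbis.conv u₀) Vorbis.L.compute_twiddle_factors.entry (Vorbis.Spec.compute_twiddle_factors.spec others frames))
    (h_cw : ∀ (others : List Obj) (frames : List (Nat × FrameLayout)),
      Calls Lay μ Vorbis.WayInv (Vorbis.conv u₀) Vorbis.L.compute_window.entry (Vorbis.Spec.compute_window.spec others frames))
    (h_cb : ∀ (others : List Obj) (frames : List (Nat × FrameLayout)) (k : Nat),
      Calls Lay μ Vorbis.WayInv (Vorbis.conv u₀) Vorbis.L.compute_bitreverse.entry (Vorbis.Spec.compute_bitreverse.spec others frames k))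
    (h_err : ∀ (others : List Obj) (frames : List (Nat × FrameLayout)),
      Calls Lay μ Vorbis.WayInv (Vorbis.conv u₀) Vorbis.L.error.entry (Vorbis.Spec.error.spec others frames))
    (others : List Obj) (frames : List (Nat × FrameLayout)) (A : Arena) (k : Nat) (u : State) (ret : Word)
    (he : AtEntry (Vorbis.conv u₀) Vorbis.L.init_blocksize.entry (init_blocksize.spec others frames A k).frame ret u)
    (hpre : (init_blocksize.spec others frames A k).pre u) :
    ReachVia Lay μ Vorbis.WayInv u (Returned (Vorbis.conv u₀) (init_blocksize.spec others frames A k) u ret) := by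
  -- entry … cut1 (line 1316)
  refine (seg1 hLay hμ hcode h_sm others frames A k u ret he hpre).trans ?_
  intro v1 hx1
  obtain ⟨A1, o1, h1⟩ := hx1
  -- cut1 … cut2 (line 1317)
  refine (seg2 hLay hμ hcode h_sm hstore8 others frames A k u ret A1 o1 v1 h1).trans ?_
  intro v2 hx2
  obtain ⟨A2, o2, h2⟩ := hx2
  -- cut2 … cut3 (line 1318)
  refine (seg3 hLay hμ hcode h_sm hstore8 others frames A k u ret A2 o2 v2 h2).trans ?_
  intro v3 hx3
  obtain ⟨A3, o3, h3⟩ := hx3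
  -- cut3 … the three NULL tests (line 1319)
  refine (seg4a hLay hμ hcode hstore8 hload8 others frames A k u ret A3 o3 v3 h3).trans ?_
  intro v4 hx4
  rcases hx4 with h4 | h4
  · -- 0x10c2ad … cut4 (line 1320)
    refine (seg4b hLay hμ hcode h_tw others frames A k u ret A3 o3 v4 h4).trans ?_
    intro v5 h5
    -- cut4 … cut5 (line 1321)
    refine (seg5 hLay hμ hcode h_sm others frames A k u ret A3 o3 v5 h5).trans ?_
    intro v6 hx6
    obtain ⟨A5, o5, h6⟩ := hx6
    -- cut5 … cut6 | cut10 (lines 1321–1323)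
    refine (seg6 hLay hμ hcode hstore8 h_cw h_err others frames A k u ret A5 o5 v6 h6).trans ?_
    intro v7 hx7
    rcases hx7 with h7 | h7
    · -- cut6 … cut7 (line 1324)
      refine (seg7 hLay hμ hcode h_sm others frames A k u ret A5 o5 v7 h7).trans ?_
      intro v8 hx8
      obtain ⟨A7, o7, h8⟩ := hx8
      -- cut7 … cut8 | cut11 (lines 1324–1326)
      refine (seg8 hLay hμ hcode hstore8 h_cb h_err others frames A k u ret A7 o7 v8 h8).trans ?_
      intro v9 hx9
      rcases hx9 with h9 | h9
      · -- cut8 … cut9 … ret (lines 1327–1328): TRUE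
        refine (seg8b hLay hμ hcode others frames A k u ret A7 o7 v9 h9).trans ?_
        intro v10 h10
        exact seg9 hLay hμ hcode others frames A k u ret A7 o7 v10 h10
      · -- cut11 … cut9 … ret: out of memory at `bit_reverse[b]`
        refine (seg11 hLay hμ hcode others frames A k u ret A7 o7 v9 h9).trans ?_
        intro v10 h10
        exact seg9 hLay hμ hcode others frames A k u ret A7 o7 v10 h10
    · -- cut10 … cut9 … ret: out of memory at `window[b]`
      refine (seg10 hLay hμ hcode others frames A k u ret A5 o5 v7 h7).trans ?_
      intro v8 h8
      exact seg9 hLay hμ hcode others frames A k u ret A5 o5 v8 h8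
  · -- 0x10c338 … cut9 … ret: out of memory at `A[b]`, `B[b]` or `C[b]`
    refine (seg4c hLay hμ hcode h_err others frames A k u ret A3 o3 v4 h4).trans ?_
    intro v5 h5
    exact seg9 hLay hμ hcode others frames A k u ret A3 o3 v5 h5

end Vorbis.Spec.init_blocksize

/-- `init_blocksize` satisfies its contract: `Vorbis.Spec.init_blocksize.whole` under the statement's binders. -/
theorem Vorbis.Spec.Worked.init_blocksize_ok : Vorbis.Spec.init_blocksize.Statement := by
  intro Lay hLay μ hμ u₀ hcode h_sm hstore8 hload8 h_tw h_cw h_cb h_err others frames A k u ret he hpre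
  exact Vorbis.Spec.init_blocksize.whole hLay hμ hcode h_sm hstore8 hload8 h_tw h_cw h_cb h_err others frames A k u ret he hpre
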